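-- pv_equiv track=rewrite | github.com/Adam-Jimenez/binarysearch-editorials | Outstanding Move.py | solve
-- ===== SOURCE A (Python) =====
-- def solve(nums):
--     orig = compute(nums)
--     off=0
--     for i,n in enumerate(nums):
--         cur=0
--         for j in range(i+1, len(nums)):
--             cur+=n
--             cur-=nums[j]
--             off=max(off,cur)
--     for i,n in enumerate(nums):
--         cur=0
--         for j in range(i-1, -1, -1):
--             cur-=n
--             cur+=nums[j]
--             off=max(off,cur)
--     return orig+off
--
-- def compute(lst):
--     return sum((i+1)*v for i,v in enumerate(lst))
-- ===== SOURCE B (Python) =====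
-- def solve(nums):
--     n = len(nums)
--     P = [0]
--     for v in nums:
--         P.append(P[-1] + v)
--     base = sum((k + 1) * v for k, v in enumerate(nums))
--     best = 0
--     for i in range(n):
--         for j in range(i + 1, n):
--             fwd = nums[i] * (j - i) - (P[j + 1] - P[i + 1])
--             bwd = (P[j] - P[i]) - nums[j] * (j - i)
--             best = max(best, fwd, bwd)
--     return base + best
-- ===== Notes on version B (the rewrite author's own statement) =====
-- stated objective: alternative
-- what changed: replaces A's two incremental running-sum sweeps (forward and backward, each with a running cur and max) by a single loop over ordered index pairs that evaluates both move directions in closed form from a precomputed prefix-sum array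
import Mathlib
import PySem

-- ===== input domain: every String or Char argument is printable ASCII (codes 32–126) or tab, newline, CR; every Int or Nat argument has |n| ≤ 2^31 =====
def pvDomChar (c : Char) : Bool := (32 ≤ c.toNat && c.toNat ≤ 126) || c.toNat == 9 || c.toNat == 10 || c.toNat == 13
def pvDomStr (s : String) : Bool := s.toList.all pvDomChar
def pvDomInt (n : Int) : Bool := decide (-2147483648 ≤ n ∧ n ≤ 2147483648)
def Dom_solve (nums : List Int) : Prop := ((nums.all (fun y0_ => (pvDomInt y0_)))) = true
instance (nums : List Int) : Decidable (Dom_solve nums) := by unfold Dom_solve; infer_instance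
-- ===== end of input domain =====

-- B replaces A's two incremental running-sum sweeps by a single pair loop reading closed-form
-- segment sums from a prefix-sum array (objective: alternative decomposition, same O(n^2) cost).

-- ===== PORT A =====
def compute (lst : List Int) : Int :=
  ((PySem.List.enumerate lst 0).map (fun p => (p.1 + 1) * p.2)).sum

def solve (nums : List Int) : Int :=
  let orig := compute nums
  let off1 := (PySem.List.enumerate nums 0).foldl (fun off p =>
    ((PySem.List.pyRange (p.1 + 1) (nums.length : Int) 1).foldl
      (fun (s : Int × Int) j =>
        let cur := s.1 + p.2 - PySem.List.pyGetD nums j 0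
        (cur, max s.2 cur)) ((0 : Int), off)).2) 0
  let off2 := (PySem.List.enumerate nums 0).foldl (fun off p =>
    ((PySem.List.pyRange (p.1 - 1) (-1) (-1)).foldl
      (fun (s : Int × Int) j =>
        let cur := s.1 - p.2 + PySem.List.pyGetD nums j 0
        (cur, max s.2 cur)) ((0 : Int), off)).2) off1
  orig + off2

-- ===== PORT B =====
def solve_alt (nums : List Int) : Int :=
  let n : Int := nums.length
  let P := nums.foldl (fun P v => P ++ [PySem.List.pyGetD P (-1) 0 + v]) [(0 : Int)]
  let base := ((PySem.List.enumerate nums 0).map (fun p => (p.1 + 1) * p.2)).sum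
  let best := (PySem.List.pyRange 0 n 1).foldl (fun best i =>
    (PySem.List.pyRange (i + 1) n 1).foldl (fun best j =>
      let fwd := PySem.List.pyGetD nums i 0 * (j - i) -
        (PySem.List.pyGetD P (j + 1) 0 - PySem.List.pyGetD P (i + 1) 0)
      let bwd := (PySem.List.pyGetD P j 0 - PySem.List.pyGetD P i 0) -
        PySem.List.pyGetD nums j 0 * (j - i)
      max (max best fwd) bwd) best) 0
  base + best

-- ===== PRECONDITION & SPEC =====
def Spec_solve (nums : List Int) (out : Int) : Prop := out = solve_alt nums
instance (nums : List Int) (out : Int) : Decidable (Spec_solve nums out) := by unfold Spec_solve; infer_instance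

-- ===== CLAIM (what is proved, stated in full; the proofs are below) =====
def Claim_equal_solve : Prop := ∀ (nums : List Int), Dom_solve nums → Spec_solve nums (solve nums)

-- ===== LEMMAS AND PROOFS =====

/-- prefix sum of the first `k` elements (Int index, clamped like `take`) -/
def pvS (nums : List Int) (k : Int) : Int := (nums.take k.toNat).sum

/-- gain of moving element `i` forward to position `j` (i < j) -/
def pvFW (nums : List Int) (i j : Int) : Int :=
  PySem.List.pyGetD nums i 0 * (j - i) - (pvS nums (j + 1) - pvS nums (i + 1))

/-- gain of moving element `j` backward to position `i` (i < j) -/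
def pvBW (nums : List Int) (i j : Int) : Int :=
  (pvS nums j - pvS nums i) - PySem.List.pyGetD nums j 0 * (j - i)

/-- forward values, grouped by the moved element -/
def pvFwdList (nums : List Int) : List Int :=
  (PySem.List.pyRange 0 (nums.length : Int) 1).flatMap (fun i =>
    (PySem.List.pyRange (i + 1) (nums.length : Int) 1).map (fun j => pvFW nums i j))

/-- backward values, grouped by the lower index -/
def pvBwdList (nums : List Int) : List Int :=
  (PySem.List.pyRange 0 (nums.length : Int) 1).flatMap (fun i =>
    (PySem.List.pyRange (i + 1) (nums.length : Int) 1).map (fun j => pvBW nums i j))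

/-- running-sum-with-running-max loop, ascending range -/
lemma pv_runmax_up (δ F : Int → Int) (b : Int) (k : Nat) :
    ∀ (a o0 : Int), (b - a).toNat = k →
    (∀ j, a ≤ j → j < b → F j = F (j - 1) + δ j) →
    (PySem.List.pyRange a b 1).foldl
      (fun (s : Int × Int) j => (s.1 + δ j, max s.2 (s.1 + δ j))) (F (a - 1), o0)
    = (F (max (a - 1) (b - 1)),
       (PySem.List.pyRange a b 1).foldl (fun o j => max o (F j)) o0) := by
  induction k with
  | zero =>
    intro a o0 hk _
    rw [PySem.List.pyRange_one_eq_nil (by omega : b ≤ a)]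
    simp only [List.foldl_nil, Prod.mk.injEq]
    exact ⟨by congr 1; omega, trivial⟩
  | succ m ih =>
    intro a o0 hk hF
    rw [PySem.List.pyRange_one_cons (by omega : a < b)]
    dsimp only [List.foldl_cons]
    rw [← hF a le_rfl (by omega)]
    have hfa2 : F a = F (a + 1 - 1) := by norm_num
    rw [hfa2]
    rw [ih (a + 1) (max o0 (F (a + 1 - 1))) (by omega) (fun j h1 h2 => hF j (by omega) h2)]
    have h1 : F (max (a + 1 - 1) (b - 1)) = F (max (a - 1) (b - 1)) := by congr 1; omega
    rw [h1, ← hfa2]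

/-- running-sum-with-running-max loop, descending range -/
lemma pv_runmax_down (δ G : Int → Int) (b : Int) (k : Nat) :
    ∀ (a o0 : Int), (a - b).toNat = k →
    (∀ j, b < j → j ≤ a → G j = G (j + 1) + δ j) →
    (PySem.List.pyRange a b (-1)).foldl
      (fun (s : Int × Int) j => (s.1 + δ j, max s.2 (s.1 + δ j))) (G (a + 1), o0)
    = (G (min (a + 1) (b + 1)),
       (PySem.List.pyRange a b (-1)).foldl (fun o j => max o (G j)) o0) := by
  induction k with
  | zero =>
    intro a o0 hk _
    rw [PySem.List.pyRange_neg_one_eq_nil (by omega : a ≤ b)]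
    simp only [List.foldl_nil, Prod.mk.injEq]
    exact ⟨by congr 1; omega, trivial⟩
  | succ m ih =>
    intro a o0 hk hG
    rw [PySem.List.pyRange_neg_one_cons (by omega : b < a)]
    dsimp only [List.foldl_cons]
    rw [← hG a (by omega) le_rfl]
    have hga2 : G a = G (a - 1 + 1) := by norm_num
    rw [hga2]
    rw [ih (a - 1) (max o0 (G (a - 1 + 1))) (by omega) (fun j h1 h2 => hG j h1 (by omega))]
    have h1 : G (min (a - 1 + 1) (b + 1)) = G (min (a + 1) (b + 1)) := by congr 1; omega
    rw [h1, ← hga2]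

/-- list of partial sums -/
def pvPsums (c : Int) : List Int → List Int
  | [] => []
  | v :: t => (c + v) :: pvPsums (c + v) t

lemma pv_psums_length (l : List Int) : ∀ c, (pvPsums c l).length = l.length := by
  induction l with
  | nil => intro c; rfl
  | cons v t ih => intro c; simp [pvPsums, ih]

lemma pv_psums_getD (l : List Int) : ∀ (c : Int) (k : Nat), k < l.length →
    (pvPsums c l).getD k 0 = c + (l.take (k + 1)).sum := by
  induction l with
  | nil => intro c k hk; simp at hk
  | cons v t ih =>
    intro c k hk
    cases k with
    | zero => simp [pvPsums]
    | succ m =>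
      simp only [pvPsums, List.getD_cons_succ]
      rw [ih (c + v) m (by simpa using hk)]
      simp [List.take_succ_cons]
      ring

lemma pv_foldP : ∀ (l acc : List Int) (c : Int) (hacc : acc ≠ []),
    acc.getLast hacc = c →
    l.foldl (fun P v => P ++ [PySem.List.pyGetD P (-1) 0 + v]) acc
    = acc ++ pvPsums c l := by
  intro l
  induction l with
  | nil => intro acc c hacc hc; simp [pvPsums]
  | cons v t ih =>
    intro acc c hacc hc
    dsimp only [List.foldl_cons]
    rw [PySem.List.pyGetD_neg_one acc 0 hacc, hc]
    rw [ih (acc ++ [c + v]) (c + v) (by simp) (by simp)]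
    simp [pvPsums]

lemma pv_P_get (nums : List Int) (j : Int) (h0 : 0 ≤ j) (h1 : j ≤ (nums.length : Int)) :
    PySem.List.pyGetD
      (nums.foldl (fun P v => P ++ [PySem.List.pyGetD P (-1) 0 + v]) [(0 : Int)]) j 0
    = pvS nums j := by
  rw [pv_foldP nums [(0 : Int)] 0 (by simp) (by simp)]
  have hps : (pvPsums 0 nums).length = nums.length := pv_psums_length nums 0
  have hlen : (((0 : Int) :: pvPsums 0 nums) : List Int).length = nums.length + 1 := by
    simp [hps]
  rw [show ([(0 : Int)] ++ pvPsums 0 nums) = (0 : Int) :: pvPsums 0 nums from rfl]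
  rw [PySem.List.pyGetD_eq_getElem _ 0 h0 (by rw [hlen]; push_cast; omega)]
  rw [← List.getD_eq_getElem ((0 : Int) :: pvPsums 0 nums) 0 (by rw [hlen]; omega)]
  cases hj : j.toNat with
  | zero =>
    have hj0 : j = 0 := by omega
    simp [hj0, pvS]
  | succ m =>
    have hm : m < nums.length := by omega
    rw [List.getD_cons_succ]
    rw [pv_psums_getD nums 0 m hm]
    simp only [pvS, hj]
    ring

lemma pv_S_step (nums : List Int) (j : Int) (h0 : 0 ≤ j) (h1 : j < (nums.length : Int)) :
    pvS nums (j + 1) - pvS nums j = PySem.List.pyGetD nums j 0 := by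
  have hj : j.toNat < nums.length := by omega
  have h2 : (j + 1).toNat = j.toNat + 1 := by omega
  simp only [pvS, h2]
  rw [List.sum_take_succ _ _ hj, PySem.List.pyGetD_eq_getElem _ 0 h0 h1]
  ring

/-- pointwise permutation of the pieces of a flatMap -/
lemma pv_flatMap_perm {α β : Type} (l : List α) (p q : α → List β)
    (h : ∀ x ∈ l, (p x).Perm (q x)) : (l.flatMap p).Perm (l.flatMap q) := by
  induction l with
  | nil => simp
  | cons x t ih =>
    simp only [List.flatMap_cons]
    exact (h x (by simp)).append (ih (fun y hy => h y (by simp [hy])))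

/-- a flatMap of appended pieces splits, up to permutation -/
lemma pv_flatMap_append_perm {α β : Type} (l : List α) (p q : α → List β) :
    (l.flatMap (fun x => p x ++ q x)).Perm (l.flatMap p ++ l.flatMap q) := by
  induction l with
  | nil => simp
  | cons x t ih =>
    simp only [List.flatMap_cons]
    refine (List.Perm.append_left (p x ++ q x) ih).trans ?_
    have hsh : ∀ (A B C D : List β), ((A ++ B) ++ (C ++ D)).Perm ((A ++ C) ++ (B ++ D)) := by
      intro A B C D
      simp only [List.append_assoc]
      refine List.Perm.append_left A ?_
      have e1 : B ++ (C ++ D) = (B ++ C) ++ D := by simp [List.append_assoc]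
      have e2 : C ++ (B ++ D) = (C ++ B) ++ D := by simp [List.append_assoc]
      rw [e1, e2]
      exact List.perm_append_comm.append_right D
    exact hsh _ _ _ _

/-- interleaved two-value pieces split into the two mapped lists -/
lemma pv_interleave {α β : Type} (l : List α) (f g : α → β) :
    (l.flatMap (fun x => [f x, g x])).Perm (l.map f ++ l.map g) := by
  induction l with
  | nil => simp
  | cons x t ih =>
    simp only [List.flatMap_cons, List.map_cons, List.cons_append]
    refine (List.Perm.append_left [f x, g x] ih).trans ?_
    simp only [List.cons_append, List.nil_append]
    exact List.Perm.cons (f x) List.perm_middle.symm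

/-- transposing a triangular double range -/
lemma pv_tri (v : Int → Int → Int) (n : Nat) :
    ((PySem.List.pyRange 0 (n : Int) 1).flatMap (fun hi =>
      (PySem.List.pyRange 0 hi 1).map (fun lo => v lo hi))).Perm
    ((PySem.List.pyRange 0 (n : Int) 1).flatMap (fun lo =>
      (PySem.List.pyRange (lo + 1) (n : Int) 1).map (fun hi => v lo hi))) := by
  induction n with
  | zero => simp [PySem.List.pyRange_one_eq_nil]
  | succ m ih =>
    have hcast : ((m + 1 : Nat) : Int) = (m : Int) + 1 := by push_cast; ring
    rw [hcast, PySem.List.pyRange_one_succ_right (by omega : (0 : Int) ≤ (m : Int))]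
    rw [List.flatMap_append, List.flatMap_append, List.flatMap_singleton,
      List.flatMap_singleton]
    rw [PySem.List.pyRange_one_eq_nil (le_refl ((m : Int) + 1))]
    simp only [List.map_nil, List.append_nil]
    have hsplit : ((PySem.List.pyRange 0 (m : Int) 1).flatMap (fun lo =>
          (PySem.List.pyRange (lo + 1) ((m : Int) + 1) 1).map (fun hi => v lo hi)))
        = (PySem.List.pyRange 0 (m : Int) 1).flatMap (fun lo =>
          (PySem.List.pyRange (lo + 1) (m : Int) 1).map (fun hi => v lo hi)
            ++ [v lo (m : Int)]) := by
      apply List.flatMap_congr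
      intro lo hlo
      rw [PySem.List.mem_pyRange_one] at hlo
      rw [PySem.List.pyRange_one_succ_right (by omega : lo + 1 ≤ (m : Int))]
      simp
    rw [hsplit]
    refine List.Perm.trans ?_ (pv_flatMap_append_perm _ _ _).symm
    have hsing : (PySem.List.pyRange 0 (m : Int) 1).flatMap (fun lo => [v lo (m : Int)])
        = (PySem.List.pyRange 0 (m : Int) 1).map (fun lo => v lo (m : Int)) := by
      induction (PySem.List.pyRange 0 (m : Int) 1) with
      | nil => simp
      | cons x t iht => simp [List.flatMap_cons, iht]
    rw [hsing]
    exact ih.append_right _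

lemma pv_A_fwd (nums : List Int) (init : Int) :
    (PySem.List.enumerate nums 0).foldl (fun off p =>
      ((PySem.List.pyRange (p.1 + 1) (nums.length : Int) 1).foldl
        (fun (s : Int × Int) j =>
          let cur := s.1 + p.2 - PySem.List.pyGetD nums j 0
          (cur, max s.2 cur)) ((0 : Int), off)).2) init
    = (pvFwdList nums).foldl max init := by
  rw [PySem.List.enumerate_eq_map_pyRange nums 0, List.foldl_map]
  simp only [PySem.List.len_eq]
  unfold pvFwdList
  rw [List.foldl_flatMap]
  apply PySem.List.foldl_congr_mem
  intro acc i hi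
  rw [PySem.List.mem_pyRange_one] at hi
  dsimp only
  rw [List.foldl_map]
  have hstep : (fun (s : Int × Int) j =>
        (s.1 + PySem.List.pyGetD nums i 0 - PySem.List.pyGetD nums j 0,
         max s.2 (s.1 + PySem.List.pyGetD nums i 0 - PySem.List.pyGetD nums j 0)))
      = (fun (s : Int × Int) j =>
        (s.1 + (PySem.List.pyGetD nums i 0 - PySem.List.pyGetD nums j 0),
         max s.2 (s.1 + (PySem.List.pyGetD nums i 0 - PySem.List.pyGetD nums j 0)))) := by
    funext s j; rw [add_sub_assoc]
  rw [hstep]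
  have h00 : pvFW nums i (i + 1 - 1) = 0 := by
    have hii : i + 1 - 1 = i := by ring
    rw [hii]; simp [pvFW]
  rw [show ((0 : Int), acc) = (pvFW nums i (i + 1 - 1), acc) from by rw [h00]]
  rw [pv_runmax_up (fun j => PySem.List.pyGetD nums i 0 - PySem.List.pyGetD nums j 0)
    (pvFW nums i) (nums.length : Int) (((nums.length : Int) - (i + 1)).toNat) (i + 1) acc rfl
    (fun j hj1 hj2 => by
      have hs := pv_S_step nums j (by omega) hj2
      simp only [pvFW]
      have hjj : j - 1 + 1 = j := by ring
      rw [hjj]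
      linear_combination -hs)]

lemma pv_A_bwd (nums : List Int) (init : Int) :
    (PySem.List.enumerate nums 0).foldl (fun off p =>
      ((PySem.List.pyRange (p.1 - 1) (-1) (-1)).foldl
        (fun (s : Int × Int) j =>
          let cur := s.1 - p.2 + PySem.List.pyGetD nums j 0
          (cur, max s.2 cur)) ((0 : Int), off)).2) init
    = (pvBwdList nums).foldl max init := by
  rw [PySem.List.enumerate_eq_map_pyRange nums 0, List.foldl_map]
  simp only [PySem.List.len_eq]
  have h1 : (PySem.List.pyRange 0 (nums.length : Int) 1).foldl (fun acc i =>
      ((PySem.List.pyRange (i - 1) (-1) (-1)).foldl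
        (fun (s : Int × Int) j =>
          let cur := s.1 - PySem.List.pyGetD nums i 0 + PySem.List.pyGetD nums j 0
          (cur, max s.2 cur)) ((0 : Int), acc)).2) init
    = (PySem.List.pyRange 0 (nums.length : Int) 1).foldl (fun acc i =>
      ((PySem.List.pyRange (i - 1) (-1) (-1)).map (fun j => pvBW nums j i)).foldl max acc)
      init := by
    apply PySem.List.foldl_congr_mem
    intro acc i hi
    rw [PySem.List.mem_pyRange_one] at hi
    dsimp only
    rw [List.foldl_map]
    have hstep : (fun (s : Int × Int) j =>
          (s.1 - PySem.List.pyGetD nums i 0 + PySem.List.pyGetD nums j 0,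
           max s.2 (s.1 - PySem.List.pyGetD nums i 0 + PySem.List.pyGetD nums j 0)))
        = (fun (s : Int × Int) j =>
          (s.1 + (PySem.List.pyGetD nums j 0 - PySem.List.pyGetD nums i 0),
           max s.2 (s.1 + (PySem.List.pyGetD nums j 0 - PySem.List.pyGetD nums i 0)))) := by
      funext s j
      rw [show s.1 - PySem.List.pyGetD nums i 0 + PySem.List.pyGetD nums j 0
          = s.1 + (PySem.List.pyGetD nums j 0 - PySem.List.pyGetD nums i 0) from by ring]
    rw [hstep]
    have h00 : pvBW nums (i - 1 + 1) i = 0 := by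
      have hii : i - 1 + 1 = i := by ring
      rw [hii]; simp [pvBW]
    rw [show ((0 : Int), acc) = (pvBW nums (i - 1 + 1) i, acc) from by rw [h00]]
    rw [pv_runmax_down (fun j => PySem.List.pyGetD nums j 0 - PySem.List.pyGetD nums i 0)
      (fun j => pvBW nums j i) (-1) ((i - 1 - (-1)).toNat) (i - 1) acc rfl
      (fun j hj1 hj2 => by
        have hs := pv_S_step nums j (by omega) (by omega)
        simp only [pvBW]
        linear_combination hs)]
  rw [h1, ← List.foldl_flatMap]
  refine List.Perm.foldl_eq ?_ init
  unfold pvBwdList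
  refine List.Perm.trans
    (pv_flatMap_perm _ _ (fun i => (PySem.List.pyRange 0 i 1).map (fun j => pvBW nums j i)) ?_)
    (pv_tri (pvBW nums) nums.length)
  intro i _
  rw [PySem.List.pyRange_neg_one_eq_reverse, show (-1 : Int) + 1 = 0 from by norm_num]
  rw [show i - 1 + 1 = i from by ring, List.map_reverse]
  exact List.reverse_perm _

lemma pv_solve_eq (nums : List Int) :
    solve nums = compute nums + (pvFwdList nums ++ pvBwdList nums).foldl max 0 := by
  simp only [solve]
  rw [pv_A_fwd nums 0, List.foldl_append, pv_A_bwd nums ((pvFwdList nums).foldl max 0)]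

lemma pv_solve_alt_eq (nums : List Int) :
    solve_alt nums = compute nums + (pvFwdList nums ++ pvBwdList nums).foldl max 0 := by
  simp only [solve_alt, compute]
  congr 1
  have hbody : (PySem.List.pyRange 0 (nums.length : Int) 1).foldl (fun best i =>
      (PySem.List.pyRange (i + 1) (nums.length : Int) 1).foldl (fun best j =>
        max (max best (PySem.List.pyGetD nums i 0 * (j - i) -
          (PySem.List.pyGetD
            (nums.foldl (fun P v => P ++ [PySem.List.pyGetD P (-1) 0 + v]) [(0 : Int)])
            (j + 1) 0 -
           PySem.List.pyGetD
            (nums.foldl (fun P v => P ++ [PySem.List.pyGetD P (-1) 0 + v]) [(0 : Int)])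
            (i + 1) 0)))
          ((PySem.List.pyGetD
            (nums.foldl (fun P v => P ++ [PySem.List.pyGetD P (-1) 0 + v]) [(0 : Int)])
            j 0 -
           PySem.List.pyGetD
            (nums.foldl (fun P v => P ++ [PySem.List.pyGetD P (-1) 0 + v]) [(0 : Int)])
            i 0) -
           PySem.List.pyGetD nums j 0 * (j - i))) best) 0
    = (PySem.List.pyRange 0 (nums.length : Int) 1).foldl (fun best i =>
      (PySem.List.pyRange (i + 1) (nums.length : Int) 1).foldl (fun best j =>
        ([pvFW nums i j, pvBW nums i j]).foldl max best) best) 0 := by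
    apply PySem.List.foldl_congr_mem
    intro acc i hi
    rw [PySem.List.mem_pyRange_one] at hi
    apply PySem.List.foldl_congr_mem
    intro acc2 j hj
    rw [PySem.List.mem_pyRange_one] at hj
    dsimp only [List.foldl_cons, List.foldl_nil]
    rw [pv_P_get nums (j + 1) (by omega) (by omega), pv_P_get nums (i + 1) (by omega) (by omega),
        pv_P_get nums j (by omega) (by omega), pv_P_get nums i (by omega) (by omega)]
    simp only [pvFW, pvBW]
  rw [hbody]
  have h2 : (PySem.List.pyRange 0 (nums.length : Int) 1).foldl (fun best i =>
      (PySem.List.pyRange (i + 1) (nums.length : Int) 1).foldl (fun best j =>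
        ([pvFW nums i j, pvBW nums i j]).foldl max best) best) 0
    = ((PySem.List.pyRange 0 (nums.length : Int) 1).flatMap (fun i =>
        (PySem.List.pyRange (i + 1) (nums.length : Int) 1).flatMap (fun j =>
          [pvFW nums i j, pvBW nums i j]))).foldl max 0 := by
    rw [List.foldl_flatMap]
    apply PySem.List.foldl_congr_mem
    intro acc i _
    rw [List.foldl_flatMap]
  rw [h2]
  refine List.Perm.foldl_eq ?_ 0
  refine List.Perm.trans (pv_flatMap_perm _ _ _ (fun i _ => pv_interleave _ _ _)) ?_
  exact pv_flatMap_append_perm _ _ _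

-- ===== VERDICT (by name: the statement is the Claim_ definition above) =====
theorem solve_spec : Claim_equal_solve := by
  intro nums _
  show solve nums = solve_alt nums
  rw [pv_solve_eq, pv_solve_alt_eq]
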